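-- pv_equiv track=rewrite | github.com/vladimirazarov/flowforge | src/utils/serializers.py | format_with_loops
-- ===== SOURCE A (Python) =====
-- def format_with_loops(nodes: list[int]) -> str:
--     """
--     Recursively detects the shortest repeated segment (i.e. a loop),
--     wraps it in parentheses with ^+, and joins everything with arrows.
--     """
--     n = len(nodes)
--     # find the shortest i<j such that nodes[i] == nodes[j]
--     best_i = best_j = None
--     best_len = n + 1
--     for i in range(n):
--         for j in range(i + 1, n):
--             if nodes[i] == nodes[j]:
--                 length = j - i
--                 if length < best_len:
--                     best_len, best_i, best_j = length, i, j
--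
--     # no loop found, just print flat
--     if best_i is None:
--         return " -> ".join(map(str, nodes))
--
--     assert best_i is not None
--     assert best_j is not None
--     # if the loop covers the entire sequence, don't recurse forever
--     if best_i == 0 and best_j == n - 1:
--         return " -> ".join(map(str, nodes))
--
--     # split into before, loop, after
--     before = nodes[:best_i]
--     loop    = nodes[best_i : best_j + 1]
--     after   = nodes[best_j + 1 :]
--
--     parts: list[str] = []
--     if before:
--         parts.append(format_with_loops(before))
--     parts.append(f"({ ' -> '.join(map(str, loop)) })⁺")
--     if after:
--         parts.append(format_with_loops(after))
--
--     return " -> ".join(parts)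
-- ===== SOURCE B (Python) =====
-- def format_with_loops(nodes: list[int]) -> str:
--     """
--     Same output as the quadratic version, but the shortest repeated
--     segment is found in one pass using a last-seen-index dictionary.
--     """
--     best = None  # (length, i, j), strictly improving => earliest minimal pair
--     last: dict[int, int] = {}
--     for j, v in enumerate(nodes):
--         if v in last:
--             length = j - last[v]
--             if best is None or length < best[0]:
--                 best = (length, last[v], j)
--         last[v] = j
--     if best is None or (best[1] == 0 and best[2] == len(nodes) - 1):
--         return " -> ".join(map(str, nodes))
--     _, i, j = best
--     parts: list[str] = []
--     if i > 0:
--         parts.append(format_with_loops(nodes[:i]))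
--     parts.append("(" + " -> ".join(map(str, nodes[i:j + 1])) + ")⁺")
--     if j + 1 < len(nodes):
--         parts.append(format_with_loops(nodes[j + 1:]))
--     return " -> ".join(parts)
-- ===== Notes on version B (the rewrite author's own statement) =====
-- stated objective: faster
-- what changed: A's per-recursion-level all-pairs double loop for the shortest repeated pair is replaced by a single pass keeping a last-seen-index dictionary: every shortest repeat is between consecutive occurrences, and scanning positions in order with strict improvement picks exactly A's (smallest gap, smallest i) pair.
import Mathlib
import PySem

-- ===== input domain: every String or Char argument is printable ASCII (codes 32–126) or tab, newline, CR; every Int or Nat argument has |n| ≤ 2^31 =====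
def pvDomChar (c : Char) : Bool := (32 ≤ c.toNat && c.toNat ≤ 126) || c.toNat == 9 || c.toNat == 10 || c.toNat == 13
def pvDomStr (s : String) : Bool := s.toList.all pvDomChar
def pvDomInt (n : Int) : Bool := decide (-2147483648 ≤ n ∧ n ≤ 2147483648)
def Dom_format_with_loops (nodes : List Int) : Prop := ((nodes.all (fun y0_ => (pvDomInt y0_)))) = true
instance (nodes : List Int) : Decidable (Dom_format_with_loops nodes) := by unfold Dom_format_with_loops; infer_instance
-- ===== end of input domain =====

-- B replaces A's all-pairs O(n^2) scan per recursion level by a one-pass last-seen-index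
-- dictionary scan (objective: faster); both recursions use fuel = list length, which the
-- shrinking slices never exhaust.

-- ===== PORT A =====
-- " -> ".join(map(str, xs))
def pvJoinArrow (xs : List Int) : String :=
  PySem.Str.join " -> " (xs.map PySem.Int.toStr)

-- the nested i/j loops of A computing (best_len, (best_i, best_j))
def pvSearchA (nodes : List Int) : Int × Option (Int × Int) :=
  let n : Int := (nodes.length : Int)
  (PySem.List.pyRange 0 n 1).foldl (fun st i =>
    (PySem.List.pyRange (i + 1) n 1).foldl (fun st j =>
      if PySem.List.pyGetD nodes i 0 = PySem.List.pyGetD nodes j 0 then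
        if j - i < st.1 then (j - i, some (i, j)) else st
      else st) st) (n + 1, none)

-- A's recursion, with fuel = nodes.length at top (the slices shrink strictly, so fuel
-- never runs out on the recursive calls; the fuel-0 branch is only reached for []).
def pvFwlA : Nat → List Int → String
  | 0, nodes => pvJoinArrow nodes
  | fuel + 1, nodes =>
    let n : Int := (nodes.length : Int)
    match (pvSearchA nodes).2 with
    | none => pvJoinArrow nodes
    | some (bi, bj) =>
      if bi = 0 ∧ bj = n - 1 then pvJoinArrow nodes
      else
        let before := PySem.List.slice nodes none (some bi)
        let loop := PySem.List.slice nodes (some bi) (some (bj + 1))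
        let after := PySem.List.slice nodes (some (bj + 1)) none
        let parts : List String :=
          (if before ≠ [] then [pvFwlA fuel before] else []) ++
          ["(" ++ pvJoinArrow loop ++ ")⁺"] ++
          (if after ≠ [] then [pvFwlA fuel after] else [])
        PySem.Str.join " -> " parts

def format_with_loops (nodes : List Int) : String := pvFwlA nodes.length nodes

-- ===== PORT B =====
-- B's one-pass scan: best = (length, i, j) strictly improving, last = last-seen index dict
def pvSearchB (nodes : List Int) : Option (Int × Int × Int) × PySem.Dict Int Int :=
  (PySem.List.enumerate nodes 0).foldl (fun st p =>
    let best' :=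
      match PySem.Dict.get? st.2 p.2 with
      | some q =>
        match st.1 with
        | none => some (p.1 - q, q, p.1)
        | some b => if p.1 - q < b.1 then some (p.1 - q, q, p.1) else st.1
      | none => st.1
    (best', PySem.Dict.insert st.2 p.2 p.1)) (none, PySem.Dict.empty)

def pvFwlB : Nat → List Int → String
  | 0, nodes => PySem.Str.join " -> " (nodes.map PySem.Int.toStr)
  | fuel + 1, nodes =>
    match (pvSearchB nodes).1 with
    | none => PySem.Str.join " -> " (nodes.map PySem.Int.toStr)
    | some (_, i, j) =>
      if i = 0 ∧ j = (nodes.length : Int) - 1 then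
        PySem.Str.join " -> " (nodes.map PySem.Int.toStr)
      else
        let parts : List String :=
          (if 0 < i then [pvFwlB fuel (PySem.List.slice nodes none (some i))] else []) ++
          ["(" ++ PySem.Str.join " -> " ((PySem.List.slice nodes (some i) (some (j + 1))).map PySem.Int.toStr) ++ ")⁺"] ++
          (if j + 1 < (nodes.length : Int) then [pvFwlB fuel (PySem.List.slice nodes (some (j + 1)) none)] else [])
        PySem.Str.join " -> " parts

def format_with_loops_alt (nodes : List Int) : String := pvFwlB nodes.length nodes

-- ===== PRECONDITION & SPEC =====
def Spec_format_with_loops (nodes : List Int) (out : String) : Prop := out = format_with_loops_alt nodes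
instance (nodes : List Int) (out : String) : Decidable (Spec_format_with_loops nodes out) := by unfold Spec_format_with_loops; infer_instance

-- ===== CLAIM (what is proved, stated in full; the proofs are below) =====
def Claim_equal_format_with_loops : Prop := ∀ (nodes : List Int), Dom_format_with_loops nodes → Spec_format_with_loops nodes (format_with_loops nodes)

-- ===== LEMMAS AND PROOFS =====

-- pick machinery
def pvPStep (b : Option (Int × Int × Int)) (t : Int × Int × Int) : Option (Int × Int × Int) :=
  match b with
  | none => some t
  | some c => if t.1 < c.1 then some t else b

def pvPick (l : List (Int × Int × Int)) : Option (Int × Int × Int) := l.foldl pvPStep none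

def pvPickFrom (t : Int × Int × Int) (l : List (Int × Int × Int)) : Int × Int × Int :=
  l.foldl (fun c u => if u.1 < c.1 then u else c) t

theorem pvPickFrom_le (l : List (Int × Int × Int)) (t : Int × Int × Int) :
    (pvPickFrom t l).1 ≤ t.1 ∧ ∀ u ∈ l, (pvPickFrom t l).1 ≤ u.1 := by
  induction l generalizing t with
  | nil => simp [pvPickFrom]
  | cons u l ih =>
    simp only [pvPickFrom, List.foldl_cons] at *
    by_cases h : u.1 < t.1
    · simp only [h, if_pos]
      rcases ih u with ⟨h1, h2⟩
      refine ⟨le_of_lt (lt_of_le_of_lt h1 h), ?_⟩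
      intro v hv
      rcases List.mem_cons.mp hv with rfl | hv
      · exact h1
      · exact h2 v hv
    · simp only [h, if_neg, not_false_iff]
      rcases ih t with ⟨h1, h2⟩
      refine ⟨h1, ?_⟩
      intro v hv
      rcases List.mem_cons.mp hv with rfl | hv
      · exact le_trans h1 (not_lt.mp h)
      · exact h2 v hv

theorem pvPickFrom_eq_self (l : List (Int × Int × Int)) (t : Int × Int × Int)
    (h : ∀ u ∈ l, t.1 ≤ u.1) : pvPickFrom t l = t := by
  induction l with
  | nil => rfl
  | cons u l ih =>
    simp only [pvPickFrom, List.foldl_cons]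
    have hu : ¬ u.1 < t.1 := not_lt.mpr (h u (List.mem_cons_self))
    simp only [hu, if_neg, not_false_iff]
    exact ih (fun v hv => h v (List.mem_cons_of_mem _ hv))

theorem pvPickFrom_first (l : List (Int × Int × Int)) (t : Int × Int × Int) :
    ∃ l₁ l₂, t :: l = l₁ ++ (pvPickFrom t l) :: l₂ ∧ ∀ u ∈ l₁, (pvPickFrom t l).1 < u.1 := by
  induction l generalizing t with
  | nil => exact ⟨[], [], rfl, by simp⟩
  | cons u l ih =>
    simp only [pvPickFrom, List.foldl_cons] at *
    by_cases h : u.1 < t.1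
    · simp only [h, if_pos]
      rcases ih u with ⟨l₁, l₂, hdec, hlt⟩
      have hw : (pvPickFrom u l).1 ≤ u.1 := (pvPickFrom_le l u).1
      refine ⟨t :: l₁, l₂, by simp at hdec ⊢; rw [hdec], ?_⟩
      intro v hv
      rcases List.mem_cons.mp hv with rfl | hv
      · exact lt_of_le_of_lt hw h
      · exact hlt v hv
    · simp only [h, if_neg, not_false_iff]
      obtain ⟨w, hw⟩ : ∃ w, List.foldl (fun c u => if u.1 < c.1 then u else c) t l = w := ⟨_, rfl⟩
      rcases ih t with ⟨l₁, l₂, hdec, hlt⟩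
      rw [hw] at hdec hlt ⊢
      cases l₁ with
      | nil =>
        simp only [List.nil_append, List.cons.injEq] at hdec
        refine ⟨[], u :: l, ?_, by simp⟩
        rw [← hdec.1]
        simp
      | cons a l₁' =>
        simp only [List.cons_append, List.cons.injEq] at hdec
        rcases hdec with ⟨rfl, hdec⟩
        refine ⟨t :: u :: l₁', l₂, by rw [hdec]; simp, ?_⟩
        intro v hv
        have htlt : w.1 < t.1 := hlt t List.mem_cons_self
        rcases List.mem_cons.mp hv with rfl | hv
        · exact htlt
        · rcases List.mem_cons.mp hv with rfl | hv
          · exact lt_of_lt_of_le htlt (not_lt.mp h)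
          · exact hlt v (List.mem_cons_of_mem _ hv)

theorem pvPick_some_foldl (l : List (Int × Int × Int)) (t : Int × Int × Int) :
    l.foldl pvPStep (some t) = some (pvPickFrom t l) := by
  induction l generalizing t with
  | nil => rfl
  | cons u l ih =>
    simp only [List.foldl_cons, pvPStep, pvPickFrom]
    by_cases h : u.1 < t.1 <;> simp [h, ih, pvPickFrom]

theorem pvPick_cons (t : Int × Int × Int) (l : List (Int × Int × Int)) :
    pvPick (t :: l) = some (pvPickFrom t l) := by
  simp only [pvPick, List.foldl_cons, pvPStep]
  exact pvPick_some_foldl l t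

theorem pvPick_eq_none_iff (l : List (Int × Int × Int)) : pvPick l = none ↔ l = [] := by
  cases l with
  | nil => simp [pvPick]
  | cons t l => simp [pvPick_cons]

theorem pvPick_mem {l : List (Int × Int × Int)} {w : Int × Int × Int}
    (h : pvPick l = some w) : w ∈ l := by
  cases l with
  | nil => simp [pvPick] at h
  | cons t l =>
    rw [pvPick_cons] at h
    obtain ⟨l₁, l₂, hdec, -⟩ := pvPickFrom_first l t
    rw [Option.some.injEq] at h
    rw [← h, hdec]
    exact List.mem_append.mpr (Or.inr List.mem_cons_self)

theorem pvPick_min {l : List (Int × Int × Int)} {w : Int × Int × Int}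
    (h : pvPick l = some w) : ∀ u ∈ l, w.1 ≤ u.1 := by
  cases l with
  | nil => simp [pvPick] at h
  | cons t l =>
    rw [pvPick_cons, Option.some.injEq] at h
    intro u hu
    rcases List.mem_cons.mp hu with rfl | hu
    · exact h ▸ (pvPickFrom_le l u).1
    · exact h ▸ (pvPickFrom_le l t).2 u hu

theorem pvPick_first {l : List (Int × Int × Int)} {w : Int × Int × Int}
    (h : pvPick l = some w) : ∃ l₁ l₂, l = l₁ ++ w :: l₂ ∧ ∀ u ∈ l₁, w.1 < u.1 := by
  cases l with
  | nil => simp [pvPick] at h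
  | cons t l =>
    rw [pvPick_cons, Option.some.injEq] at h
    obtain ⟨l₁, l₂, hdec, hlt⟩ := pvPickFrom_first l t
    exact ⟨l₁, l₂, h ▸ hdec, h ▸ hlt⟩

theorem pvPick_eq_of {l l₁ l₂ : List (Int × Int × Int)} {w : Int × Int × Int}
    (hdec : l = l₁ ++ w :: l₂) (h1 : ∀ u ∈ l₁, w.1 < u.1) (h2 : ∀ u ∈ l₂, w.1 ≤ u.1) :
    pvPick l = some w := by
  subst hdec
  cases l₁ with
  | nil =>
    simp only [List.nil_append, pvPick_cons]
    rw [pvPickFrom_eq_self _ _ h2]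
  | cons t l₁' =>
    rw [List.cons_append, pvPick_cons]
    have : pvPickFrom t (l₁' ++ w :: l₂) = pvPickFrom (pvPickFrom t l₁') (w :: l₂) := by
      simp [pvPickFrom, List.foldl_append]
    rw [this]
    obtain ⟨hle1, hle2⟩ := pvPickFrom_le l₁' t
    have hm : pvPickFrom t l₁' ∈ t :: l₁' := by
      obtain ⟨m₁, m₂, hdec', -⟩ := pvPickFrom_first l₁' t
      rw [hdec']
      exact List.mem_append.mpr (Or.inr List.mem_cons_self)
    have hwlt : w.1 < (pvPickFrom t l₁').1 := h1 _ (by simpa using hm)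
    conv_lhs => rw [show pvPickFrom (pvPickFrom t l₁') (w :: l₂)
      = pvPickFrom (if w.1 < (pvPickFrom t l₁').1 then w else pvPickFrom t l₁') l₂ from rfl]
    rw [if_pos hwlt, pvPickFrom_eq_self _ _ h2]

def pvStepA (st : Int × Option (Int × Int)) (t : Int × Int × Int) : Int × Option (Int × Int) :=
  if t.1 < st.1 then (t.1, some (t.2.1, t.2.2)) else st

def pvCandA (nodes : List Int) : List (Int × Int × Int) :=
  (PySem.List.pyRange 0 (nodes.length : Int) 1).flatMap (fun i =>
    ((PySem.List.pyRange (i + 1) (nodes.length : Int) 1).filter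
        (fun j => decide (PySem.List.pyGetD nodes i 0 = PySem.List.pyGetD nodes j 0))).map
      (fun j => (j - i, i, j)))

theorem pvSearchA_eq_fold (nodes : List Int) :
    pvSearchA nodes = (pvCandA nodes).foldl pvStepA (((nodes.length : Int)) + 1, none) := by
  unfold pvSearchA pvCandA
  rw [List.foldl_flatMap]
  apply PySem.List.foldl_congr_mem
  intro st i _
  rw [PySem.List.foldl_ite_eq_foldl_filter
    (p := fun j => PySem.List.pyGetD nodes i 0 = PySem.List.pyGetD nodes j 0)
    (f := fun st j => if j - i < st.1 then (j - i, some (i, j)) else st), List.foldl_map]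
  rfl

theorem pvFoldA_some (l : List (Int × Int × Int)) (w : Int × Int × Int) :
    l.foldl pvStepA (w.1, some (w.2.1, w.2.2))
      = ((pvPickFrom w l).1, some ((pvPickFrom w l).2.1, (pvPickFrom w l).2.2)) := by
  induction l generalizing w with
  | nil => rfl
  | cons u l ih =>
    simp only [List.foldl_cons, pvStepA, pvPickFrom]
    by_cases h : u.1 < w.1
    · rw [if_pos h, if_pos h]; exact ih u
    · rw [if_neg h, if_neg h]; exact ih w

theorem pvFoldA_none (l : List (Int × Int × Int)) (c : Int) (h : ∀ t ∈ l, t.1 < c) :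
    l.foldl pvStepA (c, none)
      = (match pvPick l with
          | none => (c, none)
          | some w => (w.1, some (w.2.1, w.2.2))) := by
  cases l with
  | nil => rfl
  | cons t l =>
    rw [pvPick_cons]
    simp only [List.foldl_cons, pvStepA]
    rw [if_pos (h t List.mem_cons_self)]
    exact pvFoldA_some l t

theorem pvCandA_mem (nodes : List Int) (u : Int × Int × Int) :
    u ∈ pvCandA nodes ↔ ∃ (iN jN : Nat), iN < jN ∧ jN < nodes.length ∧
      nodes.getD iN 0 = nodes.getD jN 0 ∧
      u = (((jN : Int)) - ((iN : Int)), ((iN : Int)), ((jN : Int))) := by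
  simp only [pvCandA, List.mem_flatMap, List.mem_map, List.mem_filter,
    PySem.List.mem_pyRange_one, decide_eq_true_eq]
  constructor
  · rintro ⟨i, ⟨hi0, hin⟩, j, ⟨⟨hij, hjn⟩, heq⟩, rfl⟩
    refine ⟨i.toNat, j.toNat, by omega, by omega, ?_, by simp [hi0]; omega⟩
    rw [← PySem.List.pyGetD_natCast (xs := nodes) (n := i.toNat) (d := 0),
        ← PySem.List.pyGetD_natCast (xs := nodes) (n := j.toNat) (d := 0)]
    rw [Int.toNat_of_nonneg hi0, Int.toNat_of_nonneg (by omega : (0:Int) ≤ j)]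
    exact heq
  · rintro ⟨iN, jN, hij, hjn, heq, rfl⟩
    refine ⟨(iN : Int), ⟨by omega, by omega⟩, (jN : Int), ⟨⟨by omega, by omega⟩, ?_⟩, rfl⟩
    rw [PySem.List.pyGetD_natCast, PySem.List.pyGetD_natCast]
    exact heq

theorem pvCandA_pairwise (nodes : List Int) :
    (pvCandA nodes).Pairwise (fun a b => a.2.1 ≤ b.2.1) := by
  unfold pvCandA
  rw [List.pairwise_flatMap]
  constructor
  · intro i _
    rw [List.pairwise_map]
    exact List.Pairwise.filter _ (List.pairwise_of_forall (fun _ _ => le_refl i))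
  · rw [PySem.List.pyRange_zero_natCast, List.pairwise_map]
    apply List.Pairwise.imp ?_ (List.pairwise_lt_range (n := nodes.length))
    rintro a b hab x hx y hy
    simp only [List.mem_map, List.mem_filter] at hx hy
    obtain ⟨jx, -, rfl⟩ := hx
    obtain ⟨jy, -, rfl⟩ := hy
    simpa using le_of_lt (by exact_mod_cast hab : ((a : Int)) < ((b : Int)))

def pvLastOcc (l : List Int) (v : Int) : Option Int :=
  (PySem.List.enumerate l 0).foldl (fun r p => if p.2 = v then some p.1 else r) none

def pvLastDict (l : List Int) : PySem.Dict Int Int :=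
  (PySem.List.enumerate l 0).foldl (fun d p => d.insert p.2 p.1) PySem.Dict.empty

def pvCandB (nodes : List Int) : List (Int × Int × Int) :=
  (List.range nodes.length).filterMap (fun j =>
    (pvLastOcc (nodes.take j) (nodes.getD j 0)).map
      (fun p => (((j : Int)) - p, p, ((j : Int)))))

theorem pvEnum_append (l : List Int) (x : Int) :
    PySem.List.enumerate (l ++ [x]) 0 = PySem.List.enumerate l 0 ++ [(((l.length : Int)), x)] := by
  rw [PySem.List.enumerate_append]
  simp [PySem.List.enumerate_cons, PySem.List.enumerate_nil]

theorem pvLastOcc_append (l : List Int) (x v : Int) :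
    pvLastOcc (l ++ [x]) v = if x = v then some ((l.length : Int)) else pvLastOcc l v := by
  unfold pvLastOcc
  rw [pvEnum_append, List.foldl_append]
  simp

theorem pvLastDict_append (l : List Int) (x : Int) :
    pvLastDict (l ++ [x]) = (pvLastDict l).insert x ((l.length : Int)) := by
  unfold pvLastDict
  rw [pvEnum_append, List.foldl_append]
  rfl

theorem pvLastDict_get? (l : List Int) (v : Int) :
    (pvLastDict l).get? v = pvLastOcc l v := by
  induction l using List.reverseRecOn with
  | nil => rfl
  | append_singleton l x ih =>
    rw [pvLastDict_append, pvLastOcc_append, PySem.Dict.get?_insert]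
    by_cases h : x = v
    · simp [h]
    · simp [h, Ne.symm h, ih]

theorem pvLastOcc_eq_some_natCast (l : List Int) (v : Int) (pN : Nat) :
    pvLastOcc l v = some ((pN : Int)) ↔
      pN < l.length ∧ l.getD pN 0 = v ∧ ∀ k, pN < k → k < l.length → l.getD k 0 ≠ v := by
  induction l using List.reverseRecOn with
  | nil => simp [pvLastOcc, PySem.List.enumerate_nil]
  | append_singleton l x ih =>
    rw [pvLastOcc_append]
    by_cases h : x = v
    · rw [if_pos h]
      constructor
      · intro he
        have : pN = l.length := by
          have := Option.some_inj.mp he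
          exact_mod_cast this.symm
        subst this
        refine ⟨by simp, by simp [h], ?_⟩
        intro k hk1 hk2
        simp at hk2
        omega
      · rintro ⟨h1, h2, h3⟩
        simp only [List.length_append, List.length_cons, List.length_nil] at h1
        rcases Nat.lt_or_ge pN l.length with hlt | hge
        · exfalso
          exact h3 l.length hlt (by simp) (by simp [h])
        · have : pN = l.length := by omega
          subst this; rfl
    · rw [if_neg h, ih]
      constructor
      · rintro ⟨h1, h2, h3⟩
        refine ⟨by simp; omega, ?_, ?_⟩
        · rw [List.getD_append]
          · exact h2
          · exact h1
        intro k hk1 hk2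
        simp only [List.length_append, List.length_cons, List.length_nil] at hk2
        rcases Nat.lt_or_ge k l.length with hlt | hge
        · rw [List.getD_append _ _ _ _ hlt]
          exact h3 k hk1 hlt
        · have : k = l.length := by omega
          subst this
          simpa using h
      · rintro ⟨h1, h2, h3⟩
        simp only [List.length_append, List.length_cons, List.length_nil] at h1
        have hpl : pN < l.length := by
          rcases Nat.lt_or_ge pN l.length with hlt | hge
          · exact hlt
          · exfalso
            have : pN = l.length := by omega
            subst this
            rw [List.getD_append_right _ _ _ _ (le_refl _)] at h2
            simp at h2
            exact h (h2)
        refine ⟨hpl, ?_, ?_⟩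
        · rw [List.getD_append _ _ _ _ hpl] at h2
          exact h2
        · intro k hk1 hk2
          have := h3 k hk1 (by simp; omega)
          rw [List.getD_append _ _ _ _ hk2] at this
          exact this

theorem pvLastOcc_shape (l : List Int) (v : Int) (p : Int) (h : pvLastOcc l v = some p) :
    ∃ pN : Nat, p = ((pN : Int)) ∧ pN < l.length := by
  induction l using List.reverseRecOn with
  | nil => simp [pvLastOcc, PySem.List.enumerate_nil] at h
  | append_singleton l x ih =>
    rw [pvLastOcc_append] at h
    by_cases hx : x = v
    · rw [if_pos hx, Option.some_inj] at h
      exact ⟨l.length, h.symm, by simp⟩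
    · rw [if_neg hx] at h
      obtain ⟨pN, rfl, hlt⟩ := ih h
      exact ⟨pN, rfl, by simp; omega⟩

theorem pvCandB_append (l : List Int) (x : Int) :
    pvCandB (l ++ [x]) = pvCandB l ++
      ((pvLastOcc l x).map (fun p => (((l.length : Int)) - p, p, ((l.length : Int))))).toList := by
  unfold pvCandB
  simp only [List.length_append, List.length_cons, List.length_nil]
  rw [show l.length + (0 + 1) = l.length + 1 by omega, List.range_succ, List.filterMap_append]
  congr 1
  · apply List.filterMap_congr
    intro j hj
    rw [List.mem_range] at hj
    rw [List.take_append_of_le_length (le_of_lt hj), List.getD_append _ _ _ _ hj]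
  · simp only [List.filterMap_cons, List.filterMap_nil]
    rw [List.take_append_of_le_length (le_refl _), List.take_length,
      List.getD_append_right _ _ _ _ (le_refl _)]
    simp only [Nat.sub_self, List.getD_cons_zero]
    cases pvLastOcc l x <;> simp

theorem pvSearchB_eq (nodes : List Int) :
    pvSearchB nodes = (pvPick (pvCandB nodes), pvLastDict nodes) := by
  induction nodes using List.reverseRecOn with
  | nil => rfl
  | append_singleton l x ih =>
    unfold pvSearchB at ih ⊢
    rw [pvEnum_append, List.foldl_append, ih, pvCandB_append, pvLastDict_append]
    simp only [List.foldl_cons, List.foldl_nil]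
    rw [pvLastDict_get?]
    cases h : pvLastOcc l x with
    | none => simp [pvPick]
    | some q =>
      simp only [Option.map_some, Option.toList_some]
      rw [show pvPick (pvCandB l ++ [(((l.length : Int)) - q, q, ((l.length : Int)))])
            = pvPStep (pvPick (pvCandB l)) (((l.length : Int)) - q, q, ((l.length : Int))) from
          List.foldl_append ..]
      cases hp : pvPick (pvCandB l) with
      | none => rfl
      | some b => rfl

theorem pvCandB_mem (nodes : List Int) (u : Int × Int × Int) :
    u ∈ pvCandB nodes ↔ ∃ jN : Nat, jN < nodes.length ∧ ∃ p : Int,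
      pvLastOcc (nodes.take jN) (nodes.getD jN 0) = some p ∧
      u = (((jN : Int)) - p, p, ((jN : Int))) := by
  simp only [pvCandB, List.mem_filterMap, List.mem_range, Option.map_eq_some_iff]
  constructor
  · rintro ⟨j, hj, p, hp, rfl⟩
    exact ⟨j, hj, p, hp, rfl⟩
  · rintro ⟨j, hj, p, hp, rfl⟩
    exact ⟨j, hj, p, hp, rfl⟩

theorem pvCandB_subset (nodes : List Int) (u : Int × Int × Int) (hu : u ∈ pvCandB nodes) :
    u ∈ pvCandA nodes := by
  rw [pvCandB_mem] at hu
  obtain ⟨jN, hj, p, hp, rfl⟩ := hu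
  obtain ⟨pN, rfl, hplt⟩ := pvLastOcc_shape _ _ _ hp
  rw [pvLastOcc_eq_some_natCast] at hp
  obtain ⟨h1, h2, -⟩ := hp
  rw [List.length_take] at hplt
  have hpj : pN < jN := by omega
  rw [pvCandA_mem]
  refine ⟨pN, jN, hpj, hj, ?_, rfl⟩
  rw [← h2, List.getD_eq_getElem?_getD, List.getD_eq_getElem?_getD,
    List.getElem?_take_of_lt hpj]

theorem pvCandB_pairwise (nodes : List Int) :
    (pvCandB nodes).Pairwise (fun a b => a.2.2 < b.2.2) := by
  unfold pvCandB
  rw [List.pairwise_filterMap]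
  apply List.Pairwise.imp ?_ (List.pairwise_lt_range (n := nodes.length))
  rintro a b hab x hx y hy
  simp only [Option.map_eq_some_iff] at hx hy
  obtain ⟨p, -, rfl⟩ := hx
  obtain ⟨q, -, rfl⟩ := hy
  simpa using (by exact_mod_cast hab : ((a : Int)) < ((b : Int)))

theorem pvPick_candA_eq_candB (nodes : List Int) :
    pvPick (pvCandA nodes) = pvPick (pvCandB nodes) := by
  cases hA : pvPick (pvCandA nodes) with
  | none =>
    rw [pvPick_eq_none_iff] at hA
    symm
    rw [pvPick_eq_none_iff]
    cases hB : pvCandB nodes with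
    | nil => rfl
    | cons u t =>
      exfalso
      have : u ∈ pvCandA nodes := pvCandB_subset nodes u (hB ▸ List.mem_cons_self)
      rw [hA] at this
      simp at this
  | some w =>
    -- w = (g, i, j), a minimal-gap pair with minimal i
    have hmem := pvPick_mem hA
    have hmin := pvPick_min hA
    obtain ⟨m₁, m₂, hmdec, hmlt⟩ := pvPick_first hA
    rw [pvCandA_mem] at hmem
    obtain ⟨iN, jN, hij, hjn, hval, hw⟩ := hmem
    -- firstness in i-terms: any candidate with strictly smaller i has strictly bigger gap
    have hfirst : ∀ u ∈ pvCandA nodes, u.2.1 < w.2.1 → w.1 < u.1 := by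
      intro u hu hui
      rw [hmdec] at hu
      rcases List.mem_append.mp hu with hu1 | hu2
      · exact hmlt u hu1
      · rcases List.mem_cons.mp hu2 with rfl | hu2
        · omega
        · exfalso
          have hpw := pvCandA_pairwise nodes
          rw [hmdec] at hpw
          have := (List.pairwise_append.mp hpw).2.1
          have := (List.pairwise_cons.mp this).1 u hu2
          omega
    -- w is a consecutive-occurrence pair, hence in candB
    have hwB : w ∈ pvCandB nodes := by
      rw [pvCandB_mem]
      refine ⟨jN, hjn, (iN : Int), ?_, by rw [hw]⟩
      rw [pvLastOcc_eq_some_natCast]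
      refine ⟨by rw [List.length_take]; omega, ?_, ?_⟩
      · rw [List.getD_eq_getElem?_getD, List.getD_eq_getElem?_getD (l := nodes),
          List.getElem?_take_of_lt hij]
        exact hval
      · intro k hk1 hk2
        rw [List.length_take] at hk2
        have hkj : k < jN := by omega
        intro hkeq
        rw [List.getD_eq_getElem?_getD, List.getElem?_take_of_lt hkj,
          ← List.getD_eq_getElem?_getD] at hkeq
        -- (k, jN) would be a candidate with a smaller gap
        have hcand : (((jN : Int)) - ((k : Int)), ((k : Int)), ((jN : Int))) ∈ pvCandA nodes := by
          rw [pvCandA_mem]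
          exact ⟨k, jN, hkj, hjn, hkeq, rfl⟩
        have := hmin _ hcand
        rw [hw] at this
        simp at this
        omega
    -- decompose candB at w and apply pvPick_eq_of
    obtain ⟨l₁, l₂, hbdec⟩ := List.append_of_mem hwB
    have hpwB := pvCandB_pairwise nodes
    rw [hbdec] at hpwB
    have hl₂ : ∀ u ∈ l₂, w.2.2 < u.2.2 :=
      (List.pairwise_cons.mp (List.pairwise_append.mp hpwB).2.1).1
    have hl₁ : ∀ u ∈ l₁, u.2.2 < w.2.2 := by
      intro u hu
      exact (List.pairwise_append.mp hpwB).2.2 u hu w List.mem_cons_self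
    symm
    apply pvPick_eq_of hbdec
    · -- elements before w in candB have strictly larger gap
      intro u hu
      have huA := pvCandB_subset nodes u (hbdec ▸ List.mem_append.mpr (Or.inl hu))
      have hule := hmin u huA
      rcases lt_or_eq_of_le hule with h | h
      · exact h
      · -- equal gap: then u's i is smaller, contradicting firstness
        exfalso
        have huA2 := huA
        rw [pvCandA_mem] at huA2
        obtain ⟨iN', jN', hij', hjn', -, hu'⟩ := huA2
        have hjlt := hl₁ u hu
        rw [hw, hu'] at hjlt h
        simp only at hjlt h
        have hii : ((iN' : Int)) < ((iN : Int)) := by omega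
        have hlt := hfirst u huA (by rw [hw, hu']; simpa using hii)
        rw [hw, hu'] at hlt
        simp only at hlt
        omega
    · intro u hu
      exact hmin u (pvCandB_subset nodes u (hbdec ▸ List.mem_append.mpr
        (Or.inr (List.mem_cons_of_mem _ hu))))

theorem pvSearchA_snd (nodes : List Int) :
    (pvSearchA nodes).2 = ((pvSearchB nodes).1).map (fun w => (w.2.1, w.2.2)) := by
  rw [pvSearchA_eq_fold, pvSearchB_eq, pvFoldA_none, ← pvPick_candA_eq_candB]
  · cases pvPick (pvCandA nodes) <;> rfl
  · intro t ht
    rw [pvCandA_mem] at ht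
    obtain ⟨iN, jN, hij, hjn, -, rfl⟩ := ht
    simp only
    omega

theorem pvSearchB_shape (nodes : List Int) (g i j : Int)
    (h : (pvSearchB nodes).1 = some (g, i, j)) :
    ∃ iN jN : Nat, i = ((iN : Int)) ∧ j = ((jN : Int)) ∧ iN < jN ∧ jN < nodes.length := by
  rw [pvSearchB_eq] at h
  have hmem := pvPick_mem h
  have := pvCandB_subset nodes _ hmem
  rw [pvCandA_mem] at this
  obtain ⟨iN, jN, hij, hjn, -, heq⟩ := this
  simp only [Prod.mk.injEq] at heq
  exact ⟨iN, jN, heq.2.1, heq.2.2, hij, hjn⟩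

theorem pvFwl_eq (fuel : Nat) : ∀ nodes : List Int, pvFwlA fuel nodes = pvFwlB fuel nodes := by
  induction fuel with
  | zero => intro nodes; rfl
  | succ fuel ih =>
    intro nodes
    rw [pvFwlA, pvFwlB]
    rw [pvSearchA_snd]
    cases hB : (pvSearchB nodes).1 with
    | none => rfl
    | some w =>
      obtain ⟨g, i, j⟩ := w
      obtain ⟨iN, jN, rfl, rfl, hij, hjn⟩ := pvSearchB_shape nodes g i j hB
      simp only [Option.map_some]
      by_cases hc : ((iN : Int)) = 0 ∧ ((jN : Int)) = ((nodes.length : Int)) - 1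
      · rw [if_pos hc, if_pos hc]
        rfl
      · rw [if_neg hc, if_neg hc]
        have hbefore : PySem.List.slice nodes none (some ((iN : Int))) = nodes.take iN :=
          PySem.List.slice_to_natCast ..
        have hafter : PySem.List.slice nodes (some (((jN : Int)) + 1)) none = nodes.drop (jN + 1) := by
          rw [show ((jN : Int)) + 1 = (((jN + 1 : Nat) : Int)) by push_cast; ring]
          exact PySem.List.slice_from_natCast ..
        have hb_iff : (nodes.take iN ≠ []) ↔ (0 < ((iN : Int))) := by
          rw [ne_eq, List.take_eq_nil_iff]
          constructor
          · intro h
            push Not at h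
            exact_mod_cast Nat.pos_of_ne_zero h.1
          · intro h
            push Not
            constructor
            · exact_mod_cast Nat.pos_iff_ne_zero.mp (by exact_mod_cast h)
            · intro hnil
              rw [hnil] at hjn
              simp at hjn
        have ha_iff : (nodes.drop (jN + 1) ≠ []) ↔ (((jN : Int)) + 1 < ((nodes.length : Int))) := by
          rw [ne_eq, List.drop_eq_nil_iff]
          constructor
          · intro h
            push Not at h
            exact_mod_cast h
          · intro h
            push Not
            exact_mod_cast h
        rw [hbefore, hafter]
        simp only [ih, pvJoinArrow, hb_iff, ha_iff]

theorem pv_main' : ∀ (nodes : List Int), format_with_loops nodes = format_with_loops_alt nodes := by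
  intro nodes
  unfold format_with_loops format_with_loops_alt
  exact pvFwl_eq nodes.length nodes

-- ===== VERDICT (by name: the statement is the Claim_ definition above) =====
theorem format_with_loops_spec : Claim_equal_format_with_loops := by
  intro nodes _
  unfold Spec_format_with_loops
  exact pv_main' nodes
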